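-- pv_equiv track=rewrite | github.com/stanislavorlov/google-interview-prep | GoogleInterviewApp/7.Backtracking/Greedy/maximum69Number.py | maximum69Number4
-- ===== SOURCE A (Python) =====
-- def maximum69Number4(num: int) -> int:
--     # Since we start with the lowest digit, initialize curr_digit = 0.
--     curr_digit = 0
--     index_first_six = -1
--     num_copy = num
--
--     # Check every digit of 'num_copy' from low to high.
--     while num_copy:
--         # If the current digit is '6', record it as the highest digit of 6.
--         if num_copy % 10 == 6:
--             index_first_six = curr_digit
--
--         # Move on to the next digit.
--         num_copy //= 10
--         curr_digit += 1
--
--     # If we don't find any digit of '6', return the original number,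
--     # otherwise, increment 'num' by the difference made by the first '6'.
--     return num if index_first_six == -1 else num + 3 * 10 ** index_first_six
-- ===== SOURCE B (Python) =====
-- def maximum69Number4(num: int) -> int:
--     # Find the largest power of 10 not exceeding num, then scan digits
--     # from the highest down and flip the first '6' found (early exit).
--     p = 1
--     while p * 10 <= num:
--         p *= 10
--     while p:
--         if num // p % 10 == 6:
--             return num + 3 * p
--         p //= 10
--     return num
-- ===== Notes on version B (the rewrite author's own statement) =====
-- stated objective: alternative
-- what changed: B scans digits from the highest power of 10 downward and returns as soon as the first (highest) '6' is found, maintaining a power of 10 instead of A's low-to-high peel with an index counter and a last-seen-6 flag.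
import Mathlib
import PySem

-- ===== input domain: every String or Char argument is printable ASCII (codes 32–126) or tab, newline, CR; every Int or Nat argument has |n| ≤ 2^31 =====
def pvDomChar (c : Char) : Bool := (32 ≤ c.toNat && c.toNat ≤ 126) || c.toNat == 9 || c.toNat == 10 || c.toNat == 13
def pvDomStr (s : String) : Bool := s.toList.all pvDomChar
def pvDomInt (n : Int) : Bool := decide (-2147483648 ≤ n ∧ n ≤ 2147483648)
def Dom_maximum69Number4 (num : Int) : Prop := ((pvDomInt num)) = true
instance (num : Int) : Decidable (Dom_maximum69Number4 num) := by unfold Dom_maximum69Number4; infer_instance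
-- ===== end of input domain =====

-- B replaces A's low-to-high digit peel (index counter + last-seen-6 flag) by a
-- high-to-low scan over powers of 10 that returns at the first (highest) '6';
-- objective: alternative. Equivalence proved for all non-negative num (A loops
-- forever on negative input).

-- ===== PORT A =====
-- while num_copy: if num_copy % 10 == 6: idx = curr; num_copy //= 10; curr += 1
-- (the loop guard 'num_copy ≠ 0' is rendered as '0 < num_copy': under Pre_ num ≥ 0
--  the two agree on every state the loop reaches; the guard only makes it total)
def maxALoop (num_copy curr_digit idx : Int) : Int :=
  if h : 0 < num_copy then
    maxALoop (PySem.Int.floordiv num_copy 10) (curr_digit + 1)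
      (if PySem.Int.mod num_copy 10 = 6 then curr_digit else idx)
  else idx
termination_by num_copy.toNat
decreasing_by
  have h1 : PySem.Int.floordiv num_copy 10 = num_copy / 10 :=
    PySem.Int.floordiv_eq_ediv_of_pos (by omega)
  rw [h1]; omega

def maximum69Number4 (num : Int) : Int :=
  let r := maxALoop num 0 (-1)
  -- 10 ** index_first_six: the exponent is ≥ 0 whenever this branch is taken
  if r = -1 then num else num + 3 * (10 : Int) ^ r.toNat

-- ===== PORT B =====
-- p = 1; while p * 10 <= num: p *= 10
def powLoop (num p : Int) : Int :=
  if h : p * 10 ≤ num ∧ 0 < p then powLoop num (p * 10) else p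
termination_by (num + 1 - p).toNat
decreasing_by omega

-- while p: if num // p % 10 == 6: return num + 3 * p; p //= 10
-- (guard 'p ≠ 0' rendered as '0 < p': p is a nonnegative power of 10 throughout)
def scanLoop (num p : Int) : Int :=
  if h : 0 < p then
    if PySem.Int.mod (PySem.Int.floordiv num p) 10 = 6 then num + 3 * p
    else scanLoop num (PySem.Int.floordiv p 10)
  else num
termination_by p.toNat
decreasing_by
  have h1 : PySem.Int.floordiv p 10 = p / 10 :=
    PySem.Int.floordiv_eq_ediv_of_pos (by omega)
  rw [h1]; omega

def maximum69Number4_alt (num : Int) : Int :=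
  scanLoop num (powLoop num 1)

-- ===== PRECONDITION & SPEC =====
-- Pre_ excludes negative num, on which Python A's 'while num_copy' never terminates
-- (num_copy //= 10 stabilises at -1), so A returns no value there.
def Pre_maximum69Number4 (num : Int) : Prop := 0 ≤ num
instance (num : Int) : Decidable (Pre_maximum69Number4 num) := by unfold Pre_maximum69Number4; infer_instance
def pvWitness_maximum69Number4 : Int := (9669)

def Spec_maximum69Number4 (num : Int) (out : Int) : Prop := out = maximum69Number4_alt num
instance (num : Int) (out : Int) : Decidable (Spec_maximum69Number4 num out) := by unfold Spec_maximum69Number4; infer_instance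

-- ===== CLAIM (what is proved, stated in full; the proofs are below) =====
def Claim_equal_maximum69Number4 : Prop := ∀ (num : Int), Dom_maximum69Number4 num → Pre_maximum69Number4 num → Spec_maximum69Number4 num (maximum69Number4 num)

-- ===== LEMMAS AND PROOFS =====

-- digit k of n (base 10)
def dig (n k : Nat) : Nat := n / 10 ^ k % 10

-- position of the highest '6' digit of n, none if there is no '6' (low-to-high recursion)
def hiSix (n : Nat) : Option Nat :=
  if _h : n = 0 then none
  else match hiSix (n / 10) with
    | some k => some (k + 1)
    | none => if n % 10 = 6 then some 0 else none
termination_by n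
decreasing_by omega

theorem dig_succ (n k : Nat) : dig n (k + 1) = dig (n / 10) k := by
  simp [dig, pow_succ, Nat.div_div_eq_div_mul, Nat.mul_comm]

theorem hiSix_none (n : Nat) : hiSix n = none → ∀ m, dig n m ≠ 6 := by
  induction n using Nat.strong_induction_on with
  | _ n ih =>
    intro h m
    by_cases hn : n = 0
    · subst hn; simp [dig]
    · rw [hiSix, dif_neg hn] at h
      cases hq : hiSix (n / 10) with
      | some k => rw [hq] at h; simp at h
      | none =>
        rw [hq] at h
        split_ifs at h with h6
        cases m with
        | zero => simpa [dig] using h6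
        | succ m => rw [dig_succ]; exact ih (n / 10) (by omega) hq m

theorem hiSix_some (n : Nat) : ∀ k, hiSix n = some k →
    dig n k = 6 ∧ ∀ m, k < m → dig n m ≠ 6 := by
  induction n using Nat.strong_induction_on with
  | _ n ih =>
    intro k h
    by_cases hn : n = 0
    · subst hn; rw [hiSix] at h; simp at h
    · rw [hiSix, dif_neg hn] at h
      cases hq : hiSix (n / 10) with
      | some k' =>
        rw [hq] at h
        simp at h
        obtain ⟨h6, hgt⟩ := ih (n / 10) (by omega) k' hq
        subst h
        refine ⟨by rw [dig_succ]; exact h6, ?_⟩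
        intro m hm
        cases m with
        | zero => omega
        | succ m => rw [dig_succ]; exact hgt m (by omega)
      | none =>
        rw [hq] at h
        split_ifs at h with h6
        simp at h
        subst h
        refine ⟨by simpa [dig] using h6, ?_⟩
        intro m hm
        cases m with
        | zero => omega
        | succ m => rw [dig_succ]; exact hiSix_none (n / 10) hq m

theorem maxALoop_eq (n : Nat) : ∀ (c idx : Int),
    maxALoop (n : Int) c idx =
      match hiSix n with
      | some k => c + k
      | none => idx := by
  induction n using Nat.strong_induction_on with
  | _ n ih =>
    intro c idx
    by_cases hn : n = 0
    · subst hn; rw [maxALoop, hiSix]; simp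
    · rw [maxALoop, dif_pos (by exact_mod_cast Nat.pos_of_ne_zero hn)]
      have hfd : PySem.Int.floordiv (n : Int) 10 = ((n / 10 : Nat) : Int) :=
        PySem.Int.floordiv_natCast n 10
      have hmd : PySem.Int.mod (n : Int) 10 = ((n % 10 : Nat) : Int) :=
        PySem.Int.mod_natCast n 10
      rw [hfd, hmd, ih (n / 10) (by omega)]
      conv_rhs => rw [hiSix]
      rw [dif_neg hn]
      cases hq : hiSix (n / 10) with
      | some k => push_cast; ring
      | none =>
        by_cases h6 : n % 10 = 6
        · have hc : ((n % 10 : Nat) : Int) = 6 := by exact_mod_cast h6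
          rw [if_pos hc]; simp [h6]
        · have hc : ((n % 10 : Nat) : Int) ≠ 6 := by exact_mod_cast h6
          rw [if_neg hc]; simp [h6]

-- first '6' at position ≤ j, scanning from j downwards
def downSix (n j : Nat) : Option Nat :=
  if dig n j = 6 then some j
  else match j with
    | 0 => none
    | j + 1 => downSix n j

theorem dig_zero_of_lt (n m : Nat) (h : n < 10 ^ m) : dig n m = 0 := by
  simp [dig, Nat.div_eq_of_lt h]

theorem hiSix_none_of (n : Nat) (hall : ∀ m, dig n m ≠ 6) : hiSix n = none := by
  cases hq : hiSix n with
  | none => rfl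
  | some k => exact absurd ((hiSix_some n k hq).1) (hall k)

theorem downSix_eq_hiSix (n : Nat) : ∀ j, (∀ m, j < m → dig n m ≠ 6) →
    downSix n j = hiSix n := by
  intro j
  induction j with
  | zero =>
    intro hall
    rw [downSix]
    by_cases hd : dig n 0 = 6
    · rw [if_pos hd]
      cases hq : hiSix n with
      | none => exact absurd hd (hiSix_none n hq 0)
      | some k =>
        obtain ⟨h6, hgt⟩ := hiSix_some n k hq
        have : k = 0 := by
          by_contra hk
          exact hall k (by omega) h6
        simp [this]
    · rw [if_neg hd]
      exact (hiSix_none_of n (fun m => by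
        cases m with
        | zero => exact hd
        | succ m => exact hall (m + 1) (by omega))).symm
  | succ j ihj =>
    intro hall
    rw [downSix]
    by_cases hd : dig n (j + 1) = 6
    · rw [if_pos hd]
      cases hq : hiSix n with
      | none => exact absurd hd (hiSix_none n hq (j + 1))
      | some k =>
        obtain ⟨h6, hgt⟩ := hiSix_some n k hq
        have : k = j + 1 := by
          by_contra hk
          rcases Nat.lt_or_ge k (j + 1) with hlt | hge
          · exact hgt (j + 1) hlt hd
          · exact hall k (by omega) h6
        simp [this]
    · rw [if_neg hd]
      exact ihj (fun m hm => by
        rcases Nat.eq_or_lt_of_le hm with he | hl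
        · exact he ▸ hd
        · exact hall m hl)

theorem powLoop_spec (num p : Int) : 0 < p →
    ∃ j : Nat, powLoop num p = p * 10 ^ j ∧ num < powLoop num p * 10 := by
  induction p using powLoop.induct (num := num) with
  | case1 q hcond ih =>
    intro hp
    rw [powLoop, dif_pos hcond]
    obtain ⟨j, hj, hlt⟩ := ih (by omega)
    exact ⟨j + 1, by rw [hj]; ring, hlt⟩
  | case2 q hcond =>
    intro hp
    rw [powLoop, dif_neg hcond]
    exact ⟨0, by ring, by omega⟩

theorem scanLoop_eq (n : Nat) (j : Nat) :
    scanLoop (n : Int) ((10 : Int) ^ j) =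
      match downSix n j with
      | some k => (n : Int) + 3 * (10 : Int) ^ k
      | none => (n : Int) := by
  induction j with
  | zero =>
    rw [scanLoop, dif_pos (by norm_num : (0 : Int) < 10 ^ 0)]
    have hfd : PySem.Int.floordiv (n : Int) ((10 : Int) ^ 0) = ((n / 10 ^ 0 : Nat) : Int) := by
      exact_mod_cast PySem.Int.floordiv_natCast n (10 ^ 0)
    have hmd : PySem.Int.mod ((n / 10 ^ 0 : Nat) : Int) 10 = ((n / 10 ^ 0 % 10 : Nat) : Int) := by
      exact_mod_cast PySem.Int.mod_natCast (n / 10 ^ 0) 10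
    rw [hfd, hmd, downSix]
    by_cases hd : dig n 0 = 6
    · have h6 : ((n / 10 ^ 0 % 10 : Nat) : Int) = 6 := by exact_mod_cast hd
      rw [if_pos h6, if_pos hd]
    · have h6 : ((n / 10 ^ 0 % 10 : Nat) : Int) ≠ 6 := by exact_mod_cast hd
      rw [if_neg h6, if_neg hd]
      have h1 : PySem.Int.floordiv ((10 : Int) ^ 0) 10 = 0 := by decide
      rw [h1, scanLoop]
      simp
  | succ j ihj =>
    rw [scanLoop, dif_pos (by positivity : (0 : Int) < 10 ^ (j + 1))]
    have hfd : PySem.Int.floordiv (n : Int) ((10 : Int) ^ (j + 1)) = ((n / 10 ^ (j + 1) : Nat) : Int) := by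
      exact_mod_cast PySem.Int.floordiv_natCast n (10 ^ (j + 1))
    have hmd : PySem.Int.mod ((n / 10 ^ (j + 1) : Nat) : Int) 10 = ((n / 10 ^ (j + 1) % 10 : Nat) : Int) := by
      exact_mod_cast PySem.Int.mod_natCast (n / 10 ^ (j + 1)) 10
    rw [hfd, hmd, downSix]
    by_cases hd : dig n (j + 1) = 6
    · have h6 : ((n / 10 ^ (j + 1) % 10 : Nat) : Int) = 6 := by exact_mod_cast hd
      rw [if_pos h6, if_pos hd]
    · have h6 : ((n / 10 ^ (j + 1) % 10 : Nat) : Int) ≠ 6 := by exact_mod_cast hd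
      rw [if_neg h6, if_neg hd]
      have h1 : PySem.Int.floordiv ((10 : Int) ^ (j + 1)) 10 = (10 : Int) ^ j := by
        rw [PySem.Int.floordiv_eq_ediv_of_pos (by norm_num), pow_succ,
          Int.mul_ediv_cancel _ (by norm_num)]
      rw [h1, ihj]

-- ===== VERDICT (by name: the statement is the Claim_ definition above) =====
theorem maximum69Number4_spec : Claim_equal_maximum69Number4 := by
  intro num hdom hpre
  unfold Spec_maximum69Number4 maximum69Number4 maximum69Number4_alt
  have hn : num = ((num.toNat : Nat) : Int) := (Int.toNat_of_nonneg hpre).symm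
  set n : Nat := num.toNat with hndef
  obtain ⟨j, hj, hlt⟩ := powLoop_spec num 1 (by norm_num)
  rw [one_mul] at hj
  rw [hj] at hlt
  have hltn : n < 10 ^ (j + 1) := by
    have : (n : Int) < (10 : Int) ^ (j + 1) := by rw [← hn]; rw [pow_succ]; linarith
    exact_mod_cast this
  have hall : ∀ m, j < m → dig n m ≠ 6 := by
    intro m hm
    have : n < 10 ^ m := lt_of_lt_of_le hltn (Nat.pow_le_pow_right (by norm_num) (by omega))
    rw [dig_zero_of_lt n m this]; norm_num
  have hB : scanLoop num (powLoop num 1) =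
      match hiSix n with
      | some k => (n : Int) + 3 * (10 : Int) ^ k
      | none => (n : Int) := by
    rw [hj, hn, scanLoop_eq, downSix_eq_hiSix n j hall]
  have hA : maxALoop num 0 (-1) =
      match hiSix n with
      | some k => (0 : Int) + k
      | none => (-1 : Int) := by
    rw [hn, maxALoop_eq]
  rw [hA, hB]
  cases hq : hiSix n with
  | none => simp [← hn]
  | some k =>
    simp only []
    have hne : (0 : Int) + (k : Int) ≠ -1 := by omega
    have ht : ((0 : Int) + (k : Int)).toNat = k := by omega
    rw [if_neg hne, ht, ← hn]
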